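-- pv_equiv track=rewrite | github.com/Liiizhen/voice_txt_command | workflow.py | split_object_attributes
-- ===== SOURCE A (Python) =====
-- from typing import Any, Dict, List, Optional
--
-- ATTRIBUTE_HINTS = {
--     "red",
--     "blue",
--     "green",
--     "yellow",
--     "black",
--     "white",
--     "orange",
--     "purple",
--     "pink",
--     "brown",
--     "gray",
--     "grey",
--     "small",
--     "large",
--     "big",
--     "tiny",
--     "empty",
--     "full",
--     "open",
--     "closed",
-- }
--
-- def split_object_attributes(obj: str, attrs: List[str]) -> tuple[str, List[str]]:
--     if attrs or not obj:
--         return obj, attrs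
--     tokens = obj.split()
--     if len(tokens) <= 1:
--         return obj, attrs
--     extracted = [token for token in tokens if token.lower() in ATTRIBUTE_HINTS]
--     if not extracted:
--         return obj, attrs
--     remaining = [token for token in tokens if token.lower() not in ATTRIBUTE_HINTS]
--     if not remaining:
--         return obj, attrs
--     return " ".join(remaining), attrs + extracted
-- ===== SOURCE B (Python) =====
-- from typing import List
--
-- ATTRIBUTE_HINTS = {
--     "red", "blue", "green", "yellow", "black", "white", "orange", "purple",
--     "pink", "brown", "gray", "grey", "small", "large", "big", "tiny",
--     "empty", "full", "open", "closed",
-- }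
--
-- def split_object_attributes(obj: str, attrs: List[str]) -> tuple[str, List[str]]:
--     if attrs or not obj:
--         return obj, attrs
--     # hand-written tokenizer: one character-level scan, no str.split()
--     n_words = 0
--     pieces: List[str] = []
--     extracted: List[str] = []
--     i = 0
--     L = len(obj)
--     while i < L:
--         if obj[i].isspace():
--             i += 1
--             continue
--         j = i
--         while j < L and not obj[j].isspace():
--             j += 1
--         word = obj[i:j]
--         n_words += 1
--         if word.lower() in ATTRIBUTE_HINTS:
--             extracted.append(word)
--         else:
--             if pieces:
--                 pieces.append(" ")
--             pieces.append(word)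
--         i = j
--     if n_words <= 1 or not extracted or not pieces:
--         return obj, attrs
--     return "".join(pieces), attrs + extracted
-- ===== Notes on version B (the rewrite author's own statement) =====
-- stated objective: alternative
-- what changed: B never calls str.split or list comprehensions: it is a hand-written character-level tokenizer that scans obj once, classifying each word as it is delimited and building the remaining sentence buffer and the extracted list on the fly, with the three post-guards merged into one.
import Mathlib
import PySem

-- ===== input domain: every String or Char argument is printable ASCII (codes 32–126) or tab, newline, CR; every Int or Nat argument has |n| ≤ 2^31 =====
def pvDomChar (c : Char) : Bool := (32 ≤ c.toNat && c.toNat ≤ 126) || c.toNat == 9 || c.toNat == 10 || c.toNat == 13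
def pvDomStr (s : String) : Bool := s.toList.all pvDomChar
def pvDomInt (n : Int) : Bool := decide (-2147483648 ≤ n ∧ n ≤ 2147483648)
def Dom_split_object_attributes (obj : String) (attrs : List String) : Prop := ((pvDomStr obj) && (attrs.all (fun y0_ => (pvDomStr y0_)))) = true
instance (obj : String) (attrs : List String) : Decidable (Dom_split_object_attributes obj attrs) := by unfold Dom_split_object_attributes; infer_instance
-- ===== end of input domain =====

-- B replaces A's str.split + two membership-filter comprehensions + ' '.join by a single
-- hand-written character-level tokenizer that classifies each word as it is delimited;
-- objective: alternative algorithm, same asymptotic cost.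

-- ===== PORT A =====
def pvHints : List String :=
  ["red", "blue", "green", "yellow", "black", "white", "orange", "purple",
   "pink", "brown", "gray", "grey", "small", "large", "big", "tiny",
   "empty", "full", "open", "closed"]

def split_object_attributes (obj : String) (attrs : List String) : String × List String :=
  if attrs ≠ [] ∨ obj = "" then (obj, attrs)
  else
    let tokens := PySem.Str.split₀ obj
    if tokens.length ≤ 1 then (obj, attrs)
    else
      let extracted := tokens.filter (fun token => pvHints.contains (PySem.Str.lower token))
      if extracted = [] then (obj, attrs)
      else
        let remaining := tokens.filter (fun token => !pvHints.contains (PySem.Str.lower token))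
        if remaining = [] then (obj, attrs)
        else (PySem.Str.join " " remaining, attrs ++ extracted)

-- ===== PORT B =====
-- character-level scanner (Source B's while loops as structural recursion over the char list):
-- skip whitespace; otherwise cut the maximal non-space word, classify it, recurse on the rest.
def pvScanGo (s : List Char) (nw : Nat) (pieces : List String) (ex : List String) :
    Nat × List String × List String :=
  match s with
  | [] => (nw, pieces, ex)
  | c :: rest =>
    if PySem.Chars.isspace c then pvScanGo rest nw pieces ex
    else
      let word := String.ofList ((c :: rest).takeWhile (fun d => !PySem.Chars.isspace d))
      let rest' := (c :: rest).dropWhile (fun d => !PySem.Chars.isspace d)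
      if pvHints.contains (PySem.Str.lower word) then
        pvScanGo rest' (nw + 1) pieces (ex ++ [word])
      else
        pvScanGo rest' (nw + 1) (if pieces.isEmpty then [word] else pieces ++ [" ", word]) ex
  termination_by s.length
  decreasing_by
    all_goals simp_all
    all_goals exact List.length_dropWhile_le _ _

def split_object_attributes_alt (obj : String) (attrs : List String) : String × List String :=
  if attrs ≠ [] ∨ obj = "" then (obj, attrs)
  else
    let r := pvScanGo obj.toList 0 [] []
    if r.1 ≤ 1 ∨ r.2.2 = [] ∨ r.2.1 = [] then (obj, attrs)
    else (PySem.Str.join "" r.2.1, attrs ++ r.2.2)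

-- ===== PRECONDITION & SPEC =====
def Spec_split_object_attributes (obj : String) (attrs : List String) (out : String × List String) : Prop := out = split_object_attributes_alt obj attrs
instance (obj : String) (attrs : List String) (out : String × List String) : Decidable (Spec_split_object_attributes obj attrs out) := by unfold Spec_split_object_attributes; infer_instance

-- ===== CLAIM =====
def Claim_equal_split_object_attributes : Prop := ∀ (obj : String) (attrs : List String), Dom_split_object_attributes obj attrs → Spec_split_object_attributes obj attrs (split_object_attributes obj attrs)

-- ===== LEMMAS AND PROOFS =====

-- the word predicate shared by both sides, at the char-list level
def pvHintW (w : List Char) : Bool := pvHints.contains (PySem.Str.lower (String.ofList w))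

-- the token list of a char string, in the scanner's recursion structure
def pvWordsOf (s : List Char) : List (List Char) :=
  match s with
  | [] => []
  | c :: rest =>
    if PySem.Chars.isspace c then pvWordsOf rest
    else (c :: rest).takeWhile (fun d => !PySem.Chars.isspace d)
         :: pvWordsOf ((c :: rest).dropWhile (fun d => !PySem.Chars.isspace d))
  termination_by s.length
  decreasing_by
    all_goals simp_all
    all_goals exact List.length_dropWhile_le _ _

-- split₀'s worker produces exactly pvWordsOf
theorem pvSplit₀_go_spec (s : List Char) (cur : List Char) (acc : List (List Char)) :
    PySem.Chars.split₀.go s cur acc =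
      acc.reverse ++
        (if cur.isEmpty then pvWordsOf s
         else (cur.reverse ++ s.takeWhile (fun d => !PySem.Chars.isspace d))
              :: pvWordsOf (s.dropWhile (fun d => !PySem.Chars.isspace d))) := by
  induction s generalizing cur acc with
  | nil =>
    simp only [PySem.Chars.split₀.go]
    by_cases h : cur.isEmpty <;> simp [h, pvWordsOf]
  | cons c rest ih =>
    by_cases hs : PySem.Chars.isspace c
    · by_cases hc : cur.isEmpty
      · have hcur : cur = [] := by simpa [List.isEmpty_iff] using hc
        simp [PySem.Chars.split₀.go, hs, ih, pvWordsOf, hcur]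
      · simp only [PySem.Chars.split₀.go, hs, if_pos, hc, if_neg, Bool.false_eq_true,
          not_false_iff, ih]
        simp [pvWordsOf, hs]
    · have hgo : PySem.Chars.split₀.go (c :: rest) cur acc
          = PySem.Chars.split₀.go rest (c :: cur) acc := by
        simp [PySem.Chars.split₀.go, hs]
      rw [hgo, ih]
      by_cases hc : cur.isEmpty
      · have hcur : cur = [] := by simpa [List.isEmpty_iff] using hc
        simp [hcur, pvWordsOf, hs]
      · simp [hc, hs]

theorem pvSplit₀_eq_wordsOf (s : List Char) :
    PySem.Chars.split₀ s = pvWordsOf s := by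
  have := pvSplit₀_go_spec s [] []
  simpa [PySem.Chars.split₀] using this

-- the pieces-buffer step of Source B, as a fold over the kept words
def pvPieceStep (p : List String) (w : List Char) : List String :=
  if p.isEmpty then [String.ofList w] else p ++ [" ", String.ofList w]

theorem pvPieces_spec (ws : List (List Char)) (p : List String) (hp : p ≠ []) :
    ws.foldl pvPieceStep p = p ++ ws.flatMap (fun w => [" ", String.ofList w]) := by
  induction ws generalizing p with
  | nil => simp
  | cons w ws ih =>
    have hp' : p.isEmpty = false := by simpa [List.isEmpty_iff] using hp
    rw [List.foldl_cons]
    have hstep : pvPieceStep p w = p ++ [" ", String.ofList w] := by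
      simp [pvPieceStep, hp']
    rw [hstep, ih _ (by simp)]
    simp

-- the scanner computes: word count, pieces fold over kept words, extracted words appended
theorem pvScanGo_spec (s : List Char) (nw : Nat) (pieces ex : List String) :
    pvScanGo s nw pieces ex =
      (nw + (pvWordsOf s).length,
       ((pvWordsOf s).filter (fun w => !pvHintW w)).foldl pvPieceStep pieces,
       ex ++ ((pvWordsOf s).filter pvHintW).map String.ofList) := by
  induction s using pvWordsOf.induct generalizing nw pieces ex with
  | case1 => simp [pvScanGo, pvWordsOf]
  | case2 c rest hs ih =>
    rw [pvScanGo, if_pos hs, ih, pvWordsOf, if_pos hs]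
  | case3 c rest hs ih =>
    rw [pvScanGo, if_neg hs, pvWordsOf, if_neg hs]
    by_cases hh : pvHintW ((c :: rest).takeWhile (fun d => !PySem.Chars.isspace d))
    · have hh' : pvHints.contains (PySem.Str.lower (String.ofList
          ((c :: rest).takeWhile (fun d => !PySem.Chars.isspace d)))) = true := hh
      rw [if_pos hh', ih]
      simp [hh]
      omega
    · have hh' : ¬ (pvHints.contains (PySem.Str.lower (String.ofList
          ((c :: rest).takeWhile (fun d => !PySem.Chars.isspace d)))) = true) := hh
      rw [if_neg hh', ih]
      have hstep : (if pieces.isEmpty then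
            [String.ofList ((c :: rest).takeWhile (fun d => !PySem.Chars.isspace d))]
          else pieces ++ [" ", String.ofList ((c :: rest).takeWhile (fun d => !PySem.Chars.isspace d))])
          = pvPieceStep pieces ((c :: rest).takeWhile (fun d => !PySem.Chars.isspace d)) := by
        simp [pvPieceStep]
      rw [hstep]
      simp [hh]
      omega

-- interleaving " " pieces and joining with "" equals joining the words with " "
theorem pvIntercalate_cons_cons (sep x y : List Char) (l : List (List Char)) :
    sep.intercalate (x :: y :: l) = x ++ sep ++ sep.intercalate (y :: l) := by
  simp [List.intercalate, List.intersperse]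

theorem pvIntercalate_space (w : List Char) (ws : List (List Char)) :
    List.intercalate [' '] (w :: ws) = w ++ ws.flatMap (fun v => ' ' :: v) := by
  induction ws generalizing w with
  | nil => simp [List.intercalate]
  | cons v vs ih =>
    rw [pvIntercalate_cons_cons, ih v]
    simp

theorem pvIntercalate_nil_char (l : List (List Char)) :
    List.intercalate ([] : List Char) l = l.flatten := by
  induction l with
  | nil => simp [List.intercalate]
  | cons x xs ih =>
    cases xs with
    | nil => simp [List.intercalate]
    | cons y ys =>
      rw [pvIntercalate_cons_cons, ih]
      simp

theorem pvJoin_pieces (ws : List (List Char)) :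
    PySem.Str.join "" (ws.foldl pvPieceStep []) =
      PySem.Str.join " " (ws.map String.ofList) := by
  cases ws with
  | nil => rfl
  | cons w ws =>
    have h1 : (w :: ws).foldl pvPieceStep []
        = [String.ofList w] ++ ws.flatMap (fun v => [" ", String.ofList v]) := by
      rw [List.foldl_cons]
      have : pvPieceStep [] w = [String.ofList w] := by simp [pvPieceStep]
      rw [this, pvPieces_spec ws [String.ofList w] (by simp)]
    rw [h1]
    simp only [PySem.Str.join, PySem.Chars.join]
    congr 1
    have h0 : ("" : String).toList = [] := rfl
    have h2 : (" " : String).toList = [' '] := rfl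
    rw [h0, h2, pvIntercalate_nil_char]
    simp only [List.map_cons, List.map_append, List.map_flatMap]
    rw [pvIntercalate_space]
    simp only [List.flatMap_def]
    clear h1
    induction ws with
    | nil => simp
    | cons v vs ih => simp_all

-- fold of pieces is empty iff there were no kept words
theorem pvPieces_eq_nil_iff (ws : List (List Char)) :
    ws.foldl pvPieceStep [] = [] ↔ ws = [] := by
  cases ws with
  | nil => simp
  | cons w ws =>
    rw [List.foldl_cons]
    have : pvPieceStep [] w = [String.ofList w] := by simp [pvPieceStep]
    rw [this, pvPieces_spec ws [String.ofList w] (by simp)]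
    simp

-- ===== VERDICT =====
theorem split_object_attributes_spec : Claim_equal_split_object_attributes := by
  intro obj attrs _
  unfold Spec_split_object_attributes split_object_attributes split_object_attributes_alt
  by_cases hg : attrs ≠ [] ∨ obj = ""
  · simp [hg]
  · rw [if_neg hg, if_neg hg]
    have htok : PySem.Str.split₀ obj = (pvWordsOf obj.toList).map String.ofList := by
      simp [PySem.Str.split₀, pvSplit₀_eq_wordsOf]
    rw [pvScanGo_spec, htok]
    have hfilt1 : ((pvWordsOf obj.toList).map String.ofList).filter
          (fun token => pvHints.contains (PySem.Str.lower token))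
        = ((pvWordsOf obj.toList).filter pvHintW).map String.ofList := by
      rw [List.filter_map]; rfl
    have hfilt2 : ((pvWordsOf obj.toList).map String.ofList).filter
          (fun token => !pvHints.contains (PySem.Str.lower token))
        = ((pvWordsOf obj.toList).filter (fun w => !pvHintW w)).map String.ofList := by
      rw [List.filter_map]; rfl
    simp only [hfilt1, hfilt2, List.length_map, Nat.zero_add]
    by_cases hn : (pvWordsOf obj.toList).length ≤ 1
    · simp [hn]
    · rw [if_neg hn]
      by_cases he : (pvWordsOf obj.toList).filter pvHintW = []
      · simp [he]
      · by_cases hr : (pvWordsOf obj.toList).filter (fun w => !pvHintW w) = []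
        · simp [he, hr]
        · have hp : ¬ ((pvWordsOf obj.toList).filter (fun w => !pvHintW w)).foldl
              pvPieceStep [] = [] := by
            rw [pvPieces_eq_nil_iff]; exact hr
          rw [if_neg (by simp [he]), if_neg (by simp [hr])]
          rw [if_neg (by simp [hn, he, hp])]
          rw [← pvJoin_pieces]
          simp
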